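-- pv_equiv track=rewrite | github.com/willJOIN/A3_Estrutura_Dados | util.py | limpar_linha
-- ===== SOURCE A (Python) =====
-- def limpar_linha(linha_com_espacos):
--   especiais = "°ªº!@#$%¨&*=+-_()[]{}´`~^:;.,/?\|'"
--   numeros = [str(valor) for valor in range(0, 10)]
--
--   linha = linha_com_espacos
--
--   for especial in especiais:
--     linha = linha.replace(especial, "")
--
--   for numero in numeros:
--     linha = linha.replace(numero, "")
--
--   return linha.replace("\n", "").upper()
-- ===== SOURCE B (Python) =====
-- def limpar_linha(linha_com_espacos):
--     remover = set("°ªº!@#$%¨&*=+-_()[]{}´`~^:;.,/?\\|'" + "0123456789" + "\n")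
--     return "".join(c for c in linha_com_espacos if c not in remover).upper()
-- ===== Notes on version B (the rewrite author's own statement) =====
-- stated objective: idiomatic
-- what changed: Replaces the ~43 whole-string replace passes (one per special character, digit and newline) with a single pass that filters out characters belonging to one precomputed removal set, then uppercases.
import Mathlib
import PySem

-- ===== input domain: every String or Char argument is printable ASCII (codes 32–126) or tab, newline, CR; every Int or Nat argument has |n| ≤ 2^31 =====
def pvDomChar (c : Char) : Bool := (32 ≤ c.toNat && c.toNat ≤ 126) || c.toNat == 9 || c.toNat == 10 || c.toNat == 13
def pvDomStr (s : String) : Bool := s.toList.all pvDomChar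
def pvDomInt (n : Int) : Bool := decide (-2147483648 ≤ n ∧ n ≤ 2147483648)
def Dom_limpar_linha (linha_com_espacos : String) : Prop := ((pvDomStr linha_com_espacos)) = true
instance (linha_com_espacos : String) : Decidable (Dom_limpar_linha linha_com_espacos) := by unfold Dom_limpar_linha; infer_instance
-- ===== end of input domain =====

-- B replaces ~43 whole-string replace passes with a single filtering pass over one removal set, then uppercases (idiomatic, one pass).


-- ===== PORT A =====
-- literal transliteration of A: a replace pass per special character, per digit string, then '\n', then upper
def limpar_linha (linha_com_espacos : String) : String :=
  let especiais : String := "°ªº!@#$%¨&*=+-_()[]{}´`~^:;.,/?\\|'"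
  let numeros : List String := (PySem.List.pyRange 0 10 1).map (fun valor => PySem.Int.toStr valor)
  let linha := linha_com_espacos
  let linha := especiais.toList.foldl (fun linha especial => PySem.Str.replace linha (String.ofList [especial]) "") linha
  let linha := numeros.foldl (fun linha numero => PySem.Str.replace linha numero "") linha
  PySem.Str.upper (PySem.Str.replace linha "\n" "")

-- ===== PORT B =====
-- literal transliteration of B: one removal set, one filtering pass ("".join of kept chars ported as String.ofList), then upper
def pvRemover : PySem.Set Char :=
  PySem.Set.ofList ("°ªº!@#$%¨&*=+-_()[]{}´`~^:;.,/?\\|'" ++ "0123456789" ++ "\n").toList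

def limpar_linha_alt (linha_com_espacos : String) : String :=
  PySem.Str.upper (String.ofList (linha_com_espacos.toList.filter (fun c => !(pvRemover.contains c))))

-- ===== PRECONDITION & SPEC =====
def Spec_limpar_linha (linha_com_espacos : String) (out : String) : Prop := out = limpar_linha_alt linha_com_espacos
instance (linha_com_espacos : String) (out : String) : Decidable (Spec_limpar_linha linha_com_espacos out) := by unfold Spec_limpar_linha; infer_instance

-- ===== CLAIM (what is proved, stated in full; the proofs are below) =====
def Claim_equal_limpar_linha : Prop := ∀ (linha_com_espacos : String), Dom_limpar_linha linha_com_espacos → Spec_limpar_linha linha_com_espacos (limpar_linha linha_com_espacos)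

-- ===== LEMMAS AND PROOFS =====

-- replacing a single-character pattern by "" is filtering that character out
theorem pv_go_single (d : Char) : ∀ (fuel : Nat) (l acc : List Char), l.length ≤ fuel →
    PySem.Chars.replace.go [d] [] fuel l acc = acc.reverse ++ l.filter (fun c => !(c == d)) := by
  intro fuel
  induction fuel with
  | zero => intro l acc h; cases l with
    | nil => simp [PySem.Chars.replace.go]
    | cons c t => simp at h
  | succ n ih =>
    intro l acc h
    cases l with
    | nil => simp [PySem.Chars.replace.go]
    | cons c t =>
      simp only [PySem.Chars.replace.go]
      by_cases hc : c = d
      · subst hc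
        simp [List.isPrefixOf, ih t acc (by simpa using h)]
      · have : [d].isPrefixOf (c :: t) = false := by
          simp [List.isPrefixOf]; intro hh; exact hc hh.symm
        rw [this, if_neg (by simp), ih t (c :: acc) (by simpa using h)]
        simp [hc]

theorem pv_replace_single (l : List Char) (d : Char) :
    PySem.Chars.replace l [d] [] = l.filter (fun c => !(c == d)) := by
  simp [PySem.Chars.replace]
  rw [pv_go_single d l.length l [] le_rfl]
  simp

-- a fold of single-character filters is one filter by list membership
theorem pv_foldl_filter (rs : List Char) : ∀ (l : List Char),
    rs.foldl (fun l d => l.filter (fun c => !(c == d))) l = l.filter (fun c => !(rs.contains c)) := by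
  induction rs with
  | nil => intro l; simp
  | cons d rs ih =>
    intro l
    simp only [List.foldl_cons, ih, List.filter_filter]
    apply List.filter_congr
    intro c _
    by_cases h : c = d <;> simp [h]

-- A's whole chain of string-level replaces, at the character-list level, is one filter
theorem pv_chain (rs : List Char) (cs : List Char) :
    PySem.Chars.replace (rs.foldl (fun l d => PySem.Chars.replace l [d] []) cs) ['\n'] [] =
      cs.filter (fun c => !((rs ++ ['\n']).contains c)) := by
  have h1 : rs.foldl (fun l d => PySem.Chars.replace l [d] []) cs =
      rs.foldl (fun l d => l.filter (fun c => !(c == d))) cs := by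
    simp only [pv_replace_single]
  rw [h1, pv_foldl_filter, pv_replace_single, List.filter_filter]
  apply List.filter_congr
  intro c _
  by_cases h : c = '\n' <;> simp [h]

theorem pv_toList_replace1 (t old : String) :
    (PySem.Str.replace t old "").toList = PySem.Chars.replace t.toList old.toList [] := by
  simp [PySem.Str.replace, String.toList_ofList]

theorem limpar_linha_spec : Claim_equal_limpar_linha := by
  intro s _
  unfold Spec_limpar_linha limpar_linha limpar_linha_alt
  simp only []
  -- evaluate the digit-string list to its ten single-character strings
  have hnum : (PySem.List.pyRange 0 10 1).map (fun valor => PySem.Int.toStr valor) =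
      (("0123456789" : String).toList.map (fun c => String.ofList [c])) := by decide
  rw [hnum]
  -- push everything to List Char
  apply congrArg PySem.Str.upper
  have hfold : ∀ (ds : List Char) (t : String),
      (ds.map (fun c => String.ofList [c])).foldl (fun linha numero => PySem.Str.replace linha numero "") t =
      String.ofList (ds.foldl (fun l d => PySem.Chars.replace l [d] []) t.toList) := by
    intro ds
    induction ds with
    | nil => intro t; simp [String.ofList]
    | cons d ds ih =>
      intro t
      simp only [List.map_cons, List.foldl_cons, ih, pv_toList_replace1, String.toList_ofList]
  have hfoldS : ∀ (ds : List Char) (t : String),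
      ds.foldl (fun linha especial => PySem.Str.replace linha (String.ofList [especial]) "") t =
      String.ofList (ds.foldl (fun l d => PySem.Chars.replace l [d] []) t.toList) := by
    intro ds
    induction ds with
    | nil => intro t; simp [String.ofList]
    | cons d ds ih =>
      intro t
      simp only [List.foldl_cons, ih, pv_toList_replace1, String.toList_ofList]
  rw [hfoldS, hfold, PySem.Str.replace]
  apply congrArg String.ofList
  rw [String.toList_ofList]
  have hcomb := pv_chain (("°ªº!@#$%¨&*=+-_()[]{}´`~^:;.,/?\\|'" : String).toList ++ ("0123456789" : String).toList) s.toList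
  rw [List.foldl_append] at hcomb
  rw [show ("\n" : String).toList = ['\n'] from rfl, show ("" : String).toList = [] from rfl, String.toList_ofList, hcomb]
  apply List.filter_congr
  intro c _
  have hmem : (pvRemover.contains c) =
      (((("°ªº!@#$%¨&*=+-_()[]{}´`~^:;.,/?\\|'" : String).toList ++ ("0123456789" : String).toList) ++ ['\n']).contains c) := by
    simp only [pvRemover, List.contains_eq_mem]
    simp [PySem.Set.mem_ofList]
  rw [hmem]
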